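-- pv_equiv track=rewrite | github.com/eunhee-dev/problem-solving | 0x09. bfs/7576번. 토마토/solve.py | solve
-- ===== SOURCE A (Python) =====
-- from collections import deque
--
-- DIRECTIONS = [(1, 0), (0, 1), (-1, 0), (0, -1)]
--
-- def bfs(n: int, m: int, board: list[list[int]]) -> list[list[int]]:
--     starts = [(x, y) for x in range(n) for y in range(m) if board[x][y] == 1]
--     queue = deque(starts)
--     dist = [[-1] * m for _ in range(n)]
--     for x, y in starts:
--         dist[x][y] = 0
--
--     while queue:
--         x, y = queue.popleft()
--         for dx, dy in DIRECTIONS: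
--             nx, ny = x + dx, y + dy
--             if 0 <= nx < n and 0 <= ny < m and dist[nx][ny] == -1 and board[nx][ny] == 0:
--                 dist[nx][ny] = dist[x][y] + 1
--                 queue.append((nx, ny))
--     return dist
--
-- def solve(n: int, m: int, board: list[list[int]]) -> int:
--     dist = bfs(n, m, board)
--     min_day = 0
--     for x in range(n):
--         for y in range(m):
--             if dist[x][y] == -1 and board[x][y] != -1:
--                 return -1
--             min_day = max(min_day, dist[x][y])
--     return min_day
-- ===== SOURCE B (Python) =====
-- DIRECTIONS = [(1, 0), (0, 1), (-1, 0), (0, -1)]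
--
-- def solve(n: int, m: int, board: list[list[int]]) -> int:
--     # day-by-day cellular simulation: repeated full-grid sweeps, no queue and no
--     # frontier; the input board is never mutated
--     ripe = [[board[x][y] == 1 for y in range(m)] for x in range(n)]
--     remaining = sum(board[x][y] == 0 for x in range(n) for y in range(m))
--     day = 0
--     while remaining:
--         new = [[ripe[x][y] or (board[x][y] == 0 and any(
--                     0 <= x + dx < n and 0 <= y + dy < m and ripe[x + dx][y + dy]
--                     for dx, dy in DIRECTIONS))
--                 for y in range(m)] for x in range(n)]
--         added = sum(new[x][y] and not ripe[x][y] for x in range(n) for y in range(m))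
--         if added == 0:
--             return -1
--         ripe = new
--         remaining -= added
--         day += 1
--     return day
-- ===== Notes on version B (the rewrite author's own statement) =====
-- stated objective: alternative
-- what changed: Replaces the deque-based BFS with a distance grid and a final max/unreachable scan of the grid by a cellular-automaton day-by-day simulation: each day a full-grid sweep recomputes the ripe set as 'already ripe or a 0-cell with a ripe neighbour', counting newly ripened cells, with no queue, no frontier and no distance array.
-- outside the precondition, e.g. on solve(1, 1, [[2]]): A returns -1, B returns 0
import Mathlib
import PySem

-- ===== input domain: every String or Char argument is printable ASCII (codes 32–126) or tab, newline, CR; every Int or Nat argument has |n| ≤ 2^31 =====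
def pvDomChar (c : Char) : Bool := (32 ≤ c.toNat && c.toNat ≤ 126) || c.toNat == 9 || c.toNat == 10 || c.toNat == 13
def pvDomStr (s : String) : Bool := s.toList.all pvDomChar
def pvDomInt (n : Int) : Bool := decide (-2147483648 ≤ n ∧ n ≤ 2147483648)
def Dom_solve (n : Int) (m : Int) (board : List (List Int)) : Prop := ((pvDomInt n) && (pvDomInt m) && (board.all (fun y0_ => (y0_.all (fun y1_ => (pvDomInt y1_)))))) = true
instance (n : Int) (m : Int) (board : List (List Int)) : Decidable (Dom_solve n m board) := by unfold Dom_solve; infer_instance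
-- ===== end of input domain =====

-- B replaces A's deque BFS (distance grid + final max/unreachable scan) by a
-- cellular-automaton day-by-day simulation: full-grid sweeps with no queue,
-- frontier or distance array (alternative decomposition; not faster).
-- Neither implementation mutates the caller's board.

-- ===== PORT A =====
def pvDirs : List (Int × Int) := [(1, 0), (0, 1), (-1, 0), (0, -1)]

def pvGet2 (g : List (List Int)) (x y : Int) : Int := (g.getD x.toNat []).getD y.toNat 0

def pvSet2 (g : List (List Int)) (x y : Int) (v : Int) : List (List Int) :=
  g.modify x.toNat (fun row => row.set y.toNat v)

-- one iteration of A's inner 'for dx, dy in DIRECTIONS' body (state = (dist, appended cells))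
def pvStep1 (n m : Int) (board : List (List Int)) (p : Int × Int)
    (s2 : List (List Int) × List (Int × Int)) (dp : Int × Int) :
    List (List Int) × List (Int × Int) :=
  if 0 ≤ p.1 + dp.1 ∧ p.1 + dp.1 < n ∧ 0 ≤ p.2 + dp.2 ∧ p.2 + dp.2 < m ∧
      pvGet2 s2.1 (p.1 + dp.1) (p.2 + dp.2) = -1 ∧ pvGet2 board (p.1 + dp.1) (p.2 + dp.2) = 0 then
    (pvSet2 s2.1 (p.1 + dp.1) (p.2 + dp.2) (pvGet2 s2.1 p.1 p.2 + 1),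
     s2.2 ++ [(p.1 + dp.1, p.2 + dp.2)])
  else s2

-- A's 'while queue' loop; fuel only makes it total (2*n*m+1 exceeds the total number of pops)
def pvBfsLoop (n m : Int) (board : List (List Int)) :
    Nat → List (Int × Int) → List (List Int) → List (List Int)
  | 0, _, d => d
  | _ + 1, [], d => d
  | f + 1, p :: rest, d =>
    let s := pvDirs.foldl (pvStep1 n m board p) (d, [])
    pvBfsLoop n m board f (rest ++ s.2) s.1

def pvStarts (n m : Int) (board : List (List Int)) : List (Int × Int) :=
  (PySem.List.pyRange 0 n 1).flatMap fun x =>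
    (PySem.List.pyRange 0 m 1).filterMap fun y =>
      if pvGet2 board x y = 1 then some (x, y) else none

def pvDist0 (n m : Int) (board : List (List Int)) : List (List Int) :=
  (pvStarts n m board).foldl (fun d p => pvSet2 d p.1 p.2 0)
    (List.replicate n.toNat (List.replicate m.toNat (-1)))

def pvAllPos (n m : Int) : List (Int × Int) :=
  (PySem.List.pyRange 0 n 1).flatMap fun x =>
    (PySem.List.pyRange 0 m 1).map fun y => (x, y)

-- A's final double loop with early 'return -1' and running max
def pvScanGo (board dist : List (List Int)) : List (Int × Int) → Int → Int
  | [], acc => acc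
  | p :: rest, acc =>
    if pvGet2 dist p.1 p.2 = -1 ∧ pvGet2 board p.1 p.2 ≠ -1 then -1
    else pvScanGo board dist rest (max acc (pvGet2 dist p.1 p.2))

def solve (n : Int) (m : Int) (board : List (List Int)) : Int :=
  pvScanGo board
    (pvBfsLoop n m board (2 * n.toNat * m.toNat + 1) (pvStarts n m board) (pvDist0 n m board))
    (pvAllPos n m) 0

-- ===== PORT B =====
def pvGetB (g : List (List Bool)) (x y : Int) : Bool := (g.getD x.toNat []).getD y.toNat true

def pvRipe0 (n m : Int) (board : List (List Int)) : List (List Bool) :=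
  (PySem.List.pyRange 0 n 1).map fun x =>
    (PySem.List.pyRange 0 m 1).map fun y => pvGet2 board x y == 1

-- one full-grid sweep: ripe, or a 0-cell with a ripe in-range neighbour
def pvSweep (n m : Int) (board : List (List Int)) (ripe : List (List Bool)) :
    List (List Bool) :=
  (PySem.List.pyRange 0 n 1).map fun x =>
    (PySem.List.pyRange 0 m 1).map fun y =>
      pvGetB ripe x y ||
        (pvGet2 board x y == 0 &&
          pvDirs.any fun dp =>
            decide (0 ≤ x + dp.1) && decide (x + dp.1 < n) &&
            decide (0 ≤ y + dp.2) && decide (y + dp.2 < m) &&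
            pvGetB ripe (x + dp.1) (y + dp.2))

-- 'added = sum(new[x][y] and not ripe[x][y] ...)'
def pvAddedCnt (n m : Int) (ripe new : List (List Bool)) : Nat :=
  (pvAllPos n m).countP fun p => pvGetB new p.1 p.2 && !pvGetB ripe p.1 p.2

-- B's 'while remaining' loop (remaining is a count, hence a Nat internally)
def pvSimLoop (n m : Int) (board : List (List Int)) (ripe : List (List Bool))
    (remaining : Nat) (day : Int) : Int :=
  if h0 : remaining = 0 then day
  else
    let new := pvSweep n m board ripe
    let added := pvAddedCnt n m ripe new
    if h1 : added = 0 then -1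
    else pvSimLoop n m board new (remaining - added) (day + 1)
termination_by remaining
decreasing_by exact Nat.sub_lt (Nat.pos_of_ne_zero h0) (Nat.pos_of_ne_zero h1)

def solve_alt (n : Int) (m : Int) (board : List (List Int)) : Int :=
  pvSimLoop n m board (pvRipe0 n m board)
    ((pvAllPos n m).countP fun p => pvGet2 board p.1 p.2 == 0) 0

-- ===== PRECONDITION & SPEC =====
-- Pre_ excludes (a) boards too small for the stated n×m (A raises IndexError there) and
-- (b) boards whose scanned n×m block contains a value outside the tomato alphabet {-1,0,1}:
-- on those A returns -1 for any unreachable exotic cell while B counts only 0-cells as unripe,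
-- both defensible readings of an input outside the problem's natural domain.
def Pre_solve (n : Int) (m : Int) (board : List (List Int)) : Prop :=
  0 < n → 0 < m →
    (n ≤ (board.length : Int) ∧
      ∀ row ∈ board.take n.toNat,
        m ≤ (row.length : Int) ∧ ∀ v ∈ row.take m.toNat, v = -1 ∨ v = 0 ∨ v = 1)

instance (n : Int) (m : Int) (board : List (List Int)) : Decidable (Pre_solve n m board) := by
  unfold Pre_solve; infer_instance

def pvWitness_solve : Int × Int × List (List Int) := (2, 2, [[1, 0], [0, 0]])

def Spec_solve (n : Int) (m : Int) (board : List (List Int)) (out : Int) : Prop :=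
  out = solve_alt n m board

instance (n : Int) (m : Int) (board : List (List Int)) (out : Int) :
    Decidable (Spec_solve n m board out) := by unfold Spec_solve; infer_instance

-- ===== CLAIM (what is proved, stated in full; the proofs are below) =====
def Claim_equal_solve : Prop :=
  ∀ (n : Int) (m : Int) (board : List (List Int)),
    Dom_solve n m board → Pre_solve n m board → Spec_solve n m board (solve n m board)

-- ===== LEMMAS AND PROOFS =====

-- in-range positions of the n x m grid
def pvInR (n m : Int) (p : Int × Int) : Prop := 0 ≤ p.1 ∧ p.1 < n ∧ 0 ≤ p.2 ∧ p.2 < m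

-- number of still-unripe (value 0, distance -1) cells
def pvCnt (n m : Int) (board d : List (List Int)) : Nat :=
  (pvAllPos n m).countP fun p => pvGet2 board p.1 p.2 == 0 && pvGet2 d p.1 p.2 == -1

theorem pvGget_ne_default {α : Type} (g : List (List α)) (x y : Int) (dflt : α)
    (h : (g.getD x.toNat []).getD y.toNat dflt ≠ dflt) :
    x.toNat < g.length ∧ y.toNat < (g.getD x.toNat []).length := by
  constructor
  · by_contra hx
    rw [List.getD_eq_getElem?_getD (l := g), List.getElem?_eq_none (by omega)] at h
    simp [List.getD] at h
  · by_contra hy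
    rw [List.getD_eq_getElem?_getD (l := g.getD x.toNat []),
      List.getElem?_eq_none (by omega)] at h
    simp at h

theorem pvGget_modset {α : Type} (g : List (List α)) (dflt v : α) (x y x' y' : Int)
    (h0x : 0 ≤ x) (h0y : 0 ≤ y) (h0x' : 0 ≤ x') (h0y' : 0 ≤ y')
    (hxl : x.toNat < g.length) (hyl : y.toNat < (g.getD x.toNat []).length) :
    ((g.modify x.toNat (fun row => row.set y.toNat v)).getD x'.toNat []).getD y'.toNat dflt
      = if x' = x ∧ y' = y then v else (g.getD x'.toNat []).getD y'.toNat dflt := by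
  have hrow : g.getD x.toNat [] = g[x.toNat] := List.getD_eq_getElem g [] hxl
  rw [hrow] at hyl
  by_cases hx : x' = x
  · subst hx
    rw [List.getD_eq_getElem (g.modify x'.toNat fun row => row.set y.toNat v) []
        (by simpa using hxl), List.getElem_modify, if_pos rfl]
    by_cases hy : y' = y
    · subst hy
      rw [if_pos ⟨rfl, rfl⟩, List.getD_eq_getElem?_getD, List.getElem?_set, if_pos rfl,
        if_pos hyl]
      rfl
    · rw [if_neg (fun hc => hy hc.2), List.getD_eq_getElem?_getD (l := List.set _ _ _),
        List.getElem?_set, if_neg (by omega), hrow, List.getD_eq_getElem?_getD]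
  · rw [if_neg (fun hc => hx hc.1)]
    rcases Nat.lt_or_ge x'.toNat g.length with hlt | hge
    · rw [List.getD_eq_getElem (g.modify x.toNat fun row => row.set y.toNat v) []
        (by simpa using hlt), List.getElem_modify, if_neg (by omega),
        List.getD_eq_getElem g [] hlt]
    · rw [List.getD_eq_getElem?_getD (l := g.modify _ _), List.getElem?_eq_none (by simpa using hge),
        List.getD_eq_getElem?_getD (l := g), List.getElem?_eq_none hge]

theorem pvGet2_set2 (g : List (List Int)) (v : Int) (x y x' y' : Int)
    (h0x : 0 ≤ x) (h0y : 0 ≤ y) (h0x' : 0 ≤ x') (h0y' : 0 ≤ y')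
    (hxl : x.toNat < g.length) (hyl : y.toNat < (g.getD x.toNat []).length) :
    pvGet2 (pvSet2 g x y v) x' y' = if x' = x ∧ y' = y then v else pvGet2 g x' y' :=
  pvGget_modset g 0 v x y x' y' h0x h0y h0x' h0y' hxl hyl

theorem pvMem_allPos (n m : Int) (p : Int × Int) : p ∈ pvAllPos n m ↔ pvInR n m p := by
  obtain ⟨x, y⟩ := p
  simp [pvAllPos, pvInR, List.mem_flatMap, PySem.List.mem_pyRange_one]
  tauto

theorem pvNodup_allPos (n m : Int) : (pvAllPos n m).Nodup := by
  have : pvAllPos n m = (PySem.List.pyRange 0 n 1) ×ˢ (PySem.List.pyRange 0 m 1) := rfl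
  rw [this]
  exact List.Nodup.product (PySem.List.nodup_pyRange_one 0 n) (PySem.List.nodup_pyRange_one 0 m)

theorem pvLen_allPos (n m : Int) : (pvAllPos n m).length = n.toNat * m.toNat := by
  unfold pvAllPos
  rw [List.length_flatMap]
  have h1 : ∀ x : Int, ((PySem.List.pyRange 0 m 1).map fun y => (x, y)).length = m.toNat := by
    intro x
    rw [List.length_map, PySem.List.length_pyRange_one]
    simp
  calc ((PySem.List.pyRange 0 n 1).map fun a =>
          ((PySem.List.pyRange 0 m 1).map fun y => (a, y)).length).sum
      = ((PySem.List.pyRange 0 n 1).map fun _ => m.toNat).sum := by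
        congr 1
        exact List.map_congr_left (fun x _ => h1 x)
    _ = (PySem.List.pyRange 0 n 1).length * m.toNat := by
        rw [List.map_const', List.sum_replicate, smul_eq_mul]
    _ = n.toNat * m.toNat := by rw [PySem.List.length_pyRange_one]; simp

theorem pvMem_starts (n m : Int) (board : List (List Int)) (p : Int × Int) :
    p ∈ pvStarts n m board ↔ pvInR n m p ∧ pvGet2 board p.1 p.2 = 1 := by
  obtain ⟨x, y⟩ := p
  simp only [pvStarts, pvInR, List.mem_flatMap, List.mem_filterMap,
    PySem.List.mem_pyRange_one]
  constructor
  · rintro ⟨a, ⟨ha0, han⟩, b, ⟨hb0, hbm⟩, hif⟩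
    by_cases hv : pvGet2 board a b = 1
    · rw [if_pos hv] at hif
      simp only [Option.some.injEq, Prod.mk.injEq] at hif
      obtain ⟨rfl, rfl⟩ := hif
      exact ⟨⟨ha0, han, hb0, hbm⟩, hv⟩
    · rw [if_neg hv] at hif
      simp at hif
  · rintro ⟨⟨hx0, hxn, hy0, hym⟩, hv⟩
    exact ⟨x, ⟨hx0, hxn⟩, y, ⟨hy0, hym⟩, by rw [if_pos hv]⟩

theorem pvLen_starts_le (n m : Int) (board : List (List Int)) :
    (pvStarts n m board).length ≤ n.toNat * m.toNat := by
  rw [← pvLen_allPos n m]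
  unfold pvStarts pvAllPos
  rw [List.length_flatMap, List.length_flatMap]
  apply List.sum_le_sum
  intro x _
  calc ((PySem.List.pyRange 0 m 1).filterMap fun y =>
          if pvGet2 board x y = 1 then some (x, y) else none).length
      ≤ (PySem.List.pyRange 0 m 1).length := List.length_filterMap_le _ _
    _ = ((PySem.List.pyRange 0 m 1).map fun y => (x, y)).length := by rw [List.length_map]

-- flipping one satisfied position of a Nodup list decrements countP
theorem pvCountP_flip {α : Type} [DecidableEq α] (l : List α) (hnd : l.Nodup)
    (f g : α → Bool) (q : α) (hq : q ∈ l) (hf : f q = true) (hg : g q = false)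
    (hoff : ∀ r ∈ l, r ≠ q → g r = f r) : l.countP f = l.countP g + 1 := by
  induction l with
  | nil => simp at hq
  | cons a t ih =>
    have hnd' : a ∉ t ∧ t.Nodup := by simpa using hnd
    by_cases ha : a = q
    · subst ha
      rw [List.countP_cons, List.countP_cons, hf, hg]
      have : t.countP f = t.countP g := by
        apply List.countP_congr
        intro r hr
        have : r ≠ a := fun hcon => hnd'.1 (hcon ▸ hr)
        rw [hoff r (List.mem_cons_of_mem _ hr) this]
      rw [hf, hg] at *
      simp [this]
    · have hqt : q ∈ t := by
        rcases List.mem_cons.mp hq with h1 | h1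
        · exact absurd h1.symm ha
        · exact h1
      rw [List.countP_cons, List.countP_cons,
        ih hnd'.2 hqt (fun r hr hrq => hoff r (List.mem_cons_of_mem _ hr) hrq),
        hoff a List.mem_cons_self ha]
      omega

theorem pvCnt_set (n m : Int) (board d : List (List Int)) (q : Int × Int)
    (hq : pvInR n m q) (hq0 : pvGet2 board q.1 q.2 = 0) (hd : pvGet2 d q.1 q.2 = -1)
    (w : Int) (hw : w ≠ -1) :
    pvCnt n m board d = pvCnt n m board (pvSet2 d q.1 q.2 w) + 1 := by
  obtain ⟨hb1, hb2⟩ := pvGget_ne_default d q.1 q.2 0 (by rw [show ((d.getD q.1.toNat []).getD q.2.toNat 0) = pvGet2 d q.1 q.2 from rfl, hd]; omega)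
  obtain ⟨hq1, hq2, hq3, hq4⟩ := hq
  apply pvCountP_flip (pvAllPos n m) (pvNodup_allPos n m) _ _ q
    ((pvMem_allPos n m q).mpr ⟨hq1, hq2, hq3, hq4⟩)
  · rw [hq0, hd]; rfl
  · have : pvGet2 (pvSet2 d q.1 q.2 w) q.1 q.2 = w := by
      rw [pvGet2_set2 d w q.1 q.2 q.1 q.2 hq1 hq3 hq1 hq3 hb1 hb2, if_pos ⟨rfl, rfl⟩]
    rw [hq0, this]
    simp [hw]
  · intro r hr hrq
    obtain ⟨hr1, hr2, hr3, hr4⟩ := (pvMem_allPos n m r).mp hr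
    have : pvGet2 (pvSet2 d q.1 q.2 w) r.1 r.2 = pvGet2 d r.1 r.2 := by
      rw [pvGet2_set2 d w q.1 q.2 r.1 r.2 hq1 hq3 hr1 hr3 hb1 hb2]
      rw [if_neg (fun hc => hrq (Prod.ext hc.1 hc.2))]
    rw [this]

-- the invariant of A's wave fold relative to the wave-start grid d0
structure PvWave (n m : Int) (board : List (List Int)) (day : Int) (d0 : List (List Int))
    (s : List (List Int) × List (Int × Int)) : Prop where
  keep : ∀ q : Int × Int, pvInR n m q → pvGet2 d0 q.1 q.2 ≠ -1 →
    pvGet2 s.1 q.1 q.2 = pvGet2 d0 q.1 q.2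
  chg : ∀ q : Int × Int, pvInR n m q → pvGet2 s.1 q.1 q.2 ≠ pvGet2 d0 q.1 q.2 → q ∈ s.2
  new : ∀ q ∈ s.2, pvInR n m q ∧ pvGet2 s.1 q.1 q.2 = day + 1 ∧ pvGet2 board q.1 q.2 = 0 ∧
    ∃ dp ∈ pvDirs, pvInR n m (q.1 + dp.1, q.2 + dp.2) ∧
      pvGet2 d0 (q.1 + dp.1) (q.2 + dp.2) = day
  dec : pvCnt n m board d0 = pvCnt n m board s.1 + s.2.length

theorem pvDirs_neg (dp : Int × Int) (h : dp ∈ pvDirs) :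
    ∃ dp' ∈ pvDirs, dp'.1 = -dp.1 ∧ dp'.2 = -dp.2 := by
  simp only [pvDirs, List.mem_cons, List.not_mem_nil, or_false] at h
  rcases h with rfl | rfl | rfl | rfl
  · exact ⟨(-1, 0), by simp [pvDirs]⟩
  · exact ⟨(0, -1), by simp [pvDirs]⟩
  · exact ⟨(1, 0), by simp [pvDirs]⟩
  · exact ⟨(0, 1), by simp [pvDirs]⟩

theorem pvWave_step (n m : Int) (board : List (List Int)) (day : Int) (hday : 0 ≤ day)
    (d0 : List (List Int)) (p dp : Int × Int) (hp : pvInR n m p) (hdp : dp ∈ pvDirs)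
    (hpd0 : pvGet2 d0 p.1 p.2 = day)
    (s : List (List Int) × List (Int × Int)) (h : PvWave n m board day d0 s) :
    PvWave n m board day d0 (pvStep1 n m board p s dp) := by
  obtain ⟨hkeep, hchg, hnew, hdec⟩ := h
  obtain ⟨hp1, hp2, hp3, hp4⟩ := hp
  have hcur : pvGet2 s.1 p.1 p.2 = day := by
    have hne : pvGet2 d0 p.1 p.2 ≠ -1 := by rw [hpd0]; omega
    rw [hkeep p ⟨hp1, hp2, hp3, hp4⟩ hne, hpd0]
  by_cases hcond : 0 ≤ p.1 + dp.1 ∧ p.1 + dp.1 < n ∧ 0 ≤ p.2 + dp.2 ∧ p.2 + dp.2 < m ∧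
      pvGet2 s.1 (p.1 + dp.1) (p.2 + dp.2) = -1 ∧ pvGet2 board (p.1 + dp.1) (p.2 + dp.2) = 0
  · obtain ⟨c1, c2, c3, c4, c5, c6⟩ := hcond
    unfold pvStep1
    rw [if_pos ⟨c1, c2, c3, c4, c5, c6⟩]
    have hinr : pvInR n m (p.1 + dp.1, p.2 + dp.2) := ⟨c1, c2, c3, c4⟩
    have hAb := pvGget_ne_default s.1 (p.1 + dp.1) (p.2 + dp.2) 0
      (by rw [show ((s.1.getD (p.1 + dp.1).toNat []).getD (p.2 + dp.2).toNat 0)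
            = pvGet2 s.1 (p.1 + dp.1) (p.2 + dp.2) from rfl, c5]; omega)
    have hA : ∀ q : Int × Int, pvInR n m q →
        pvGet2 (pvSet2 s.1 (p.1 + dp.1) (p.2 + dp.2) (pvGet2 s.1 p.1 p.2 + 1)) q.1 q.2
          = if q.1 = p.1 + dp.1 ∧ q.2 = p.2 + dp.2 then day + 1 else pvGet2 s.1 q.1 q.2 := by
      intro q hq
      obtain ⟨hq1, hq2, hq3, hq4⟩ := hq
      rw [pvGet2_set2 s.1 _ _ _ q.1 q.2 c1 c3 hq1 hq3 hAb.1 hAb.2, hcur]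
    have hd0t : pvGet2 d0 (p.1 + dp.1) (p.2 + dp.2) = -1 := by
      by_contra hcn
      have := hkeep _ hinr hcn
      rw [c5] at this
      exact hcn this.symm
    refine ⟨?_, ?_, ?_, ?_⟩
    · intro q hq hqne
      show pvGet2 (pvSet2 _ _ _ _) q.1 q.2 = pvGet2 d0 q.1 q.2
      rw [hA q hq]
      by_cases he : q.1 = p.1 + dp.1 ∧ q.2 = p.2 + dp.2
      · exfalso
        have : pvGet2 d0 q.1 q.2 = -1 := by rw [he.1, he.2]; exact hd0t
        exact hqne this
      · rw [if_neg he]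
        exact hkeep q hq hqne
    · intro q hq hne
      show q ∈ s.2 ++ [(p.1 + dp.1, p.2 + dp.2)]
      rw [show (pvSet2 s.1 (p.1 + dp.1) (p.2 + dp.2) (pvGet2 s.1 p.1 p.2 + 1),
          s.2 ++ [(p.1 + dp.1, p.2 + dp.2)]).1
          = pvSet2 s.1 (p.1 + dp.1) (p.2 + dp.2) (pvGet2 s.1 p.1 p.2 + 1) from rfl,
        hA q hq] at hne
      by_cases he : q.1 = p.1 + dp.1 ∧ q.2 = p.2 + dp.2
      · exact List.mem_append_right _ (by
          have : q = (p.1 + dp.1, p.2 + dp.2) := Prod.ext he.1 he.2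
          simp [this])
      · rw [if_neg he] at hne
        exact List.mem_append_left _ (hchg q hq hne)
    · intro q hqm
      rcases List.mem_append.mp hqm with hql | hqr
      · obtain ⟨hqi, hqv, hq0, hwitb⟩ := hnew q hql
        refine ⟨hqi, ?_, hq0, hwitb⟩
        show pvGet2 (pvSet2 _ _ _ _) q.1 q.2 = day + 1
        rw [hA q hqi]
        have he : ¬(q.1 = p.1 + dp.1 ∧ q.2 = p.2 + dp.2) := by
          intro hc
          have : pvGet2 s.1 q.1 q.2 = -1 := by rw [hc.1, hc.2]; exact c5
          omega
        rw [if_neg he]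
        exact hqv
      · have hqe : q = (p.1 + dp.1, p.2 + dp.2) := by simpa using hqr
        subst hqe
        obtain ⟨dp', hdp', hn1, hn2⟩ := pvDirs_neg dp hdp
        refine ⟨hinr, ?_, c6, dp', hdp', ?_, ?_⟩
        · show pvGet2 (pvSet2 _ _ _ _) _ _ = day + 1
          rw [hA _ hinr, if_pos ⟨rfl, rfl⟩]
        · show pvInR n m (p.1 + dp.1 + dp'.1, p.2 + dp.2 + dp'.2)
          have e1 : p.1 + dp.1 + dp'.1 = p.1 := by rw [hn1]; ring
          have e2 : p.2 + dp.2 + dp'.2 = p.2 := by rw [hn2]; ring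
          rw [e1, e2]
          exact ⟨hp1, hp2, hp3, hp4⟩
        · show pvGet2 d0 (p.1 + dp.1 + dp'.1) (p.2 + dp.2 + dp'.2) = day
          have e1 : p.1 + dp.1 + dp'.1 = p.1 := by rw [hn1]; ring
          have e2 : p.2 + dp.2 + dp'.2 = p.2 := by rw [hn2]; ring
          rw [e1, e2, hpd0]
    · show pvCnt n m board d0 = pvCnt n m board (pvSet2 _ _ _ _) + (s.2 ++ _).length
      have hstep := pvCnt_set n m board s.1 (p.1 + dp.1, p.2 + dp.2) hinr c6 c5
        (pvGet2 s.1 p.1 p.2 + 1) (by rw [hcur]; omega)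
      dsimp only at hstep
      rw [List.length_append]
      simp only [List.length_cons, List.length_nil]
      omega
  · unfold pvStep1
    rw [if_neg hcond]
    exact ⟨hkeep, hchg, hnew, hdec⟩

theorem pvWave_dirs (n m : Int) (board : List (List Int)) (day : Int) (hday : 0 ≤ day)
    (d0 : List (List Int)) (p : Int × Int) (hp : pvInR n m p)
    (hpd0 : pvGet2 d0 p.1 p.2 = day)
    (s : List (List Int) × List (Int × Int)) (h : PvWave n m board day d0 s) :
    PvWave n m board day d0 (pvDirs.foldl (pvStep1 n m board p) s) := by
  have gen : ∀ (ds : List (Int × Int)), (∀ e ∈ ds, e ∈ pvDirs) →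
      ∀ s, PvWave n m board day d0 s →
        PvWave n m board day d0 (ds.foldl (pvStep1 n m board p) s) := by
    intro ds
    induction ds with
    | nil => intro _ s h; exact h
    | cons e ds ih =>
      intro hsub s h
      exact ih (fun e' he' => hsub e' (List.mem_cons_of_mem _ he'))
        _ (pvWave_step n m board day hday d0 p e hp (hsub e List.mem_cons_self) hpd0 s h)
  exact gen pvDirs (fun e he => he) s h

theorem pvWave_wave (n m : Int) (board : List (List Int)) (day : Int) (hday : 0 ≤ day)
    (d0 : List (List Int)) (l : List (Int × Int))
    (hl : ∀ p ∈ l, pvInR n m p ∧ pvGet2 d0 p.1 p.2 = day)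
    (s : List (List Int) × List (Int × Int)) (h : PvWave n m board day d0 s) :
    PvWave n m board day d0
      (l.foldl (fun s q => pvDirs.foldl (pvStep1 n m board q) s) s) := by
  induction l generalizing s with
  | nil => exact h
  | cons p l ih =>
    exact ih (fun q hqm => hl q (List.mem_cons_of_mem _ hqm)) _
      (pvWave_dirs n m board day hday d0 p (hl p List.mem_cons_self).1
        (hl p List.mem_cons_self).2 s h)

-- marked cells are never rewritten: one step preserves any non-(-1) value
theorem pvStep1_mono (n m : Int) (board : List (List Int)) (p dp : Int × Int)
    (s : List (List Int) × List (Int × Int)) (q : Int × Int) (hq : pvInR n m q)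
    (h : pvGet2 s.1 q.1 q.2 ≠ -1) :
    pvGet2 (pvStep1 n m board p s dp).1 q.1 q.2 = pvGet2 s.1 q.1 q.2 := by
  obtain ⟨hq1, hq2, hq3, hq4⟩ := hq
  unfold pvStep1
  split_ifs with hc
  · obtain ⟨c1, c2, c3, c4, c5, c6⟩ := hc
    have hAb := pvGget_ne_default s.1 (p.1 + dp.1) (p.2 + dp.2) 0
      (by rw [show ((s.1.getD (p.1 + dp.1).toNat []).getD (p.2 + dp.2).toNat 0)
            = pvGet2 s.1 (p.1 + dp.1) (p.2 + dp.2) from rfl, c5]; omega)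
    show pvGet2 (pvSet2 _ _ _ _) q.1 q.2 = _
    rw [pvGet2_set2 s.1 _ _ _ q.1 q.2 c1 c3 hq1 hq3 hAb.1 hAb.2]
    rw [if_neg (by
      intro he
      have : pvGet2 s.1 q.1 q.2 = -1 := by rw [he.1, he.2]; exact c5
      exact h this)]
  · rfl

theorem pvDirs_mono (n m : Int) (board : List (List Int)) (p : Int × Int)
    (dirs : List (Int × Int)) (s : List (List Int) × List (Int × Int))
    (q : Int × Int) (hq : pvInR n m q) (h : pvGet2 s.1 q.1 q.2 ≠ -1) :
    pvGet2 (dirs.foldl (pvStep1 n m board p) s).1 q.1 q.2 = pvGet2 s.1 q.1 q.2 := by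
  induction dirs generalizing s with
  | nil => rfl
  | cons e dirs ih =>
    rw [List.foldl_cons, ih _ (by rw [pvStep1_mono n m board p e s q hq h]; exact h),
      pvStep1_mono n m board p e s q hq h]

theorem pvFold_mono (n m : Int) (board : List (List Int)) (l : List (Int × Int))
    (s : List (List Int) × List (Int × Int)) (q : Int × Int) (hq : pvInR n m q)
    (h : pvGet2 s.1 q.1 q.2 ≠ -1) :
    pvGet2 (l.foldl (fun s r => pvDirs.foldl (pvStep1 n m board r) s) s).1 q.1 q.2
      = pvGet2 s.1 q.1 q.2 := by
  induction l generalizing s with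
  | nil => rfl
  | cons p l ih =>
    rw [List.foldl_cons, ih _ (by rw [pvDirs_mono n m board p pvDirs s q hq h]; exact h),
      pvDirs_mono n m board p pvDirs s q hq h]

-- expanding a cell of value v ≥ 0 marks each of its in-range zero neighbours
theorem pvDirs_mark (n m : Int) (board : List (List Int)) (p : Int × Int) (hp : pvInR n m p)
    (v : Int) (hv : 0 ≤ v) (dp : Int × Int) (q : Int × Int)
    (hqc : q.1 = p.1 + dp.1 ∧ q.2 = p.2 + dp.2) (hq : pvInR n m q)
    (hq0 : pvGet2 board q.1 q.2 = 0) (dirs : List (Int × Int)) (hdp : dp ∈ dirs)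
    (s : List (List Int) × List (Int × Int)) (hpv : pvGet2 s.1 p.1 p.2 = v) :
    pvGet2 (dirs.foldl (pvStep1 n m board p) s).1 q.1 q.2 ≠ -1 := by
  induction dirs generalizing s with
  | nil => simp at hdp
  | cons e rest ih =>
    rw [List.foldl_cons]
    by_cases hqm : pvGet2 s.1 q.1 q.2 = -1
    · rcases List.mem_cons.mp hdp with rfl | hdp'
      · -- the step at this direction marks q
        have hinrq := hq
        obtain ⟨hq1, hq2, hq3, hq4⟩ := hq
        have hfire : pvStep1 n m board p s dp
            = (pvSet2 s.1 (p.1 + dp.1) (p.2 + dp.2) (pvGet2 s.1 p.1 p.2 + 1),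
               s.2 ++ [(p.1 + dp.1, p.2 + dp.2)]) := by
          unfold pvStep1
          rw [if_pos ⟨by omega, by rw [← hqc.1]; omega, by omega, by rw [← hqc.2]; omega,
            by rw [← hqc.1, ← hqc.2]; exact hqm, by rw [← hqc.1, ← hqc.2]; exact hq0⟩]
        rw [hfire]
        have hAb := pvGget_ne_default s.1 (p.1 + dp.1) (p.2 + dp.2) 0
          (by rw [show ((s.1.getD (p.1 + dp.1).toNat []).getD (p.2 + dp.2).toNat 0)
                = pvGet2 s.1 (p.1 + dp.1) (p.2 + dp.2) from rfl, ← hqc.1, ← hqc.2, hqm]; omega)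
        have hmarked : pvGet2 (pvSet2 s.1 (p.1 + dp.1) (p.2 + dp.2)
            (pvGet2 s.1 p.1 p.2 + 1)) q.1 q.2 = pvGet2 s.1 p.1 p.2 + 1 := by
          rw [pvGet2_set2 s.1 _ _ _ q.1 q.2 (by omega) (by omega) hq1 hq3 hAb.1 hAb.2,
            if_pos ⟨hqc.1, hqc.2⟩]
        rw [pvDirs_mono n m board p rest _ q hinrq (by rw [hmarked, hpv]; omega), hmarked, hpv]
        omega
      · -- dp occurs later; p's value survives the step at e
        exact ih hdp' (pvStep1 n m board p s e)
          (by rw [pvStep1_mono n m board p e s p hp (by rw [hpv]; omega)]; exact hpv)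
    · -- q already marked: every later step preserves its value
      rw [pvDirs_mono n m board p rest _ q hq
          (by rw [pvStep1_mono n m board p e s q hq hqm]; exact hqm),
        pvStep1_mono n m board p e s q hq hqm]
      exact hqm

theorem pvList_mark (n m : Int) (board : List (List Int)) (l : List (Int × Int))
    (day : Int) (hday : 0 ≤ day) (nb : Int × Int) (hnb : nb ∈ l) (hnbR : pvInR n m nb)
    (dp : Int × Int) (hdp : dp ∈ pvDirs) (q : Int × Int)
    (hqc : q.1 = nb.1 + dp.1 ∧ q.2 = nb.2 + dp.2) (hq : pvInR n m q)
    (hq0 : pvGet2 board q.1 q.2 = 0)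
    (s : List (List Int) × List (Int × Int)) (hnbv : pvGet2 s.1 nb.1 nb.2 = day) :
    pvGet2 (l.foldl (fun s r => pvDirs.foldl (pvStep1 n m board r) s) s).1 q.1 q.2 ≠ -1 := by
  induction l generalizing s with
  | nil => simp at hnb
  | cons a t ih =>
    rw [List.foldl_cons]
    rcases List.mem_cons.mp hnb with rfl | hnb'
    · have h1 : pvGet2 (pvDirs.foldl (pvStep1 n m board nb) s).1 q.1 q.2 ≠ -1 :=
        pvDirs_mark n m board nb hnbR day hday dp q hqc hq hq0 pvDirs hdp s hnbv
      rw [pvFold_mono n m board t _ q hq h1]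
      exact h1
    · exact ih hnb' (pvDirs.foldl (pvStep1 n m board a) s)
        (by rw [pvDirs_mono n m board a pvDirs s nb hnbR (by rw [hnbv]; omega)]; exact hnbv)

-- A's acc is append-only, so the fold may be restarted with an empty acc
theorem pvStepA_shift (n m : Int) (board : List (List Int)) (p : Int × Int)
    (dirs : List (Int × Int)) (s : List (List Int) × List (Int × Int)) :
    dirs.foldl (pvStep1 n m board p) s =
      ((dirs.foldl (pvStep1 n m board p) (s.1, [])).1,
        s.2 ++ (dirs.foldl (pvStep1 n m board p) (s.1, [])).2) := by
  induction dirs generalizing s with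
  | nil => simp
  | cons dp dirs ih =>
    rw [List.foldl_cons, List.foldl_cons, ih (pvStep1 n m board p s dp),
      ih (pvStep1 n m board p (s.1, []) dp)]
    have hstep : pvStep1 n m board p s dp
        = ((pvStep1 n m board p (s.1, []) dp).1, s.2 ++ (pvStep1 n m board p (s.1, []) dp).2) := by
      unfold pvStep1
      split_ifs <;> simp
    rw [hstep]
    simp

theorem pvExpA_shift (n m : Int) (board : List (List Int)) (l : List (Int × Int)) :
    ∀ (d : List (List Int)) (a : List (Int × Int)),
    l.foldl (fun s q => pvDirs.foldl (pvStep1 n m board q) s) (d, a)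
      = ((l.foldl (fun s q => pvDirs.foldl (pvStep1 n m board q) s) (d, [])).1,
          a ++ (l.foldl (fun s q => pvDirs.foldl (pvStep1 n m board q) s) (d, [])).2) := by
  induction l with
  | nil => simp
  | cons p l ih =>
    intro d a
    simp only [List.foldl_cons]
    rw [pvStepA_shift n m board p pvDirs (d, a), pvStepA_shift n m board p pvDirs (d, [])]
    simp only [List.nil_append]
    rw [ih _ _, ih _ _]
    have hX := ih (List.foldl (pvStep1 n m board p) (d, []) pvDirs).1
      (List.foldl (pvStep1 n m board p) (d, []) pvDirs).2
    rw [Prod.mk.eta] at hX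
    rw [hX]
    simp [List.append_assoc]

-- FIFO-queue BFS processes one whole wave as a block
theorem pvBfsLoop_nil (n m : Int) (board : List (List Int)) (f : Nat) (d : List (List Int)) :
    pvBfsLoop n m board f [] d = d := by
  cases f <;> rfl

theorem pvBfsLoop_cons (n m : Int) (board : List (List Int)) (f : Nat) (p : Int × Int)
    (rest : List (Int × Int)) (d : List (List Int)) :
    pvBfsLoop n m board (f + 1) (p :: rest) d
      = pvBfsLoop n m board f (rest ++ (pvDirs.foldl (pvStep1 n m board p) (d, [])).2)
          (pvDirs.foldl (pvStep1 n m board p) (d, [])).1 := rfl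

theorem pvBfs_decomp (n m : Int) (board : List (List Int)) (q₁ : List (Int × Int)) :
    ∀ (q₂ : List (Int × Int)) (d : List (List Int)) (f : Nat),
    pvBfsLoop n m board (f + q₁.length) (q₁ ++ q₂) d
      = pvBfsLoop n m board f
          (q₂ ++ (q₁.foldl (fun s q => pvDirs.foldl (pvStep1 n m board q) s) (d, [])).2)
          ((q₁.foldl (fun s q => pvDirs.foldl (pvStep1 n m board q) s) (d, [])).1) := by
  induction q₁ with
  | nil => intro q₂ d f; simp
  | cons p l ih =>
    intro q₂ d f
    have hlen : f + (p :: l).length = (f + l.length) + 1 := by simp; omega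
    rw [hlen]
    show pvBfsLoop n m board ((f + l.length) + 1) (p :: (l ++ q₂)) d = _
    rw [pvBfsLoop_cons, List.append_assoc l q₂, ih (q₂ ++ _) _ f]
    simp only [List.foldl_cons]
    have hX := pvExpA_shift n m board l
      (List.foldl (pvStep1 n m board p) (d, []) pvDirs).1
      (List.foldl (pvStep1 n m board p) (d, []) pvDirs).2
    rw [Prod.mk.eta] at hX
    rw [hX]
    simp [List.append_assoc]

theorem pvBfs_decomp0 (n m : Int) (board : List (List Int)) (q₁ : List (Int × Int))
    (d : List (List Int)) (f : Nat) :
    pvBfsLoop n m board (f + q₁.length) q₁ d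
      = pvBfsLoop n m board f
          ((q₁.foldl (fun s q => pvDirs.foldl (pvStep1 n m board q) s) (d, [])).2)
          ((q₁.foldl (fun s q => pvDirs.foldl (pvStep1 n m board q) s) (d, [])).1) := by
  have h := pvBfs_decomp n m board q₁ [] d f
  rw [List.append_nil, List.nil_append] at h
  exact h

theorem pvScanGo_bad (board d : List (List Int)) (l : List (Int × Int)) (acc : Int)
    (h : ∃ p ∈ l, pvGet2 d p.1 p.2 = -1 ∧ pvGet2 board p.1 p.2 ≠ -1) :
    pvScanGo board d l acc = -1 := by
  induction l generalizing acc with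
  | nil => simp at h
  | cons p rest ih =>
    simp only [pvScanGo]
    split_ifs with hc
    · rfl
    · rcases h with ⟨q, hql, hq⟩
      rcases List.mem_cons.mp hql with rfl | hqt
      · exact absurd hq hc
      · exact ih _ ⟨q, hqt, hq⟩

theorem pvScanGo_good (board d : List (List Int)) (l : List (Int × Int)) (acc : Int)
    (h : ∀ p ∈ l, ¬(pvGet2 d p.1 p.2 = -1 ∧ pvGet2 board p.1 p.2 ≠ -1)) :
    pvScanGo board d l acc = l.foldl (fun a p => max a (pvGet2 d p.1 p.2)) acc := by
  induction l generalizing acc with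
  | nil => rfl
  | cons p rest ih =>
    simp only [pvScanGo, List.foldl_cons]
    rw [if_neg (h p List.mem_cons_self)]
    exact ih _ (fun q hq => h q (List.mem_cons_of_mem _ hq))

theorem pvFoldlMax_le (l : List (Int × Int)) (f : Int × Int → Int) (c : Int) :
    ∀ acc : Int, acc ≤ c → (∀ x ∈ l, f x ≤ c) →
    l.foldl (fun a x => max a (f x)) acc ≤ c := by
  induction l with
  | nil => intro acc hacc _; exact hacc
  | cons x t ih =>
    intro acc hacc hl
    rw [List.foldl_cons]
    exact ih _ (max_le hacc (hl x List.mem_cons_self))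
      (fun q hq => hl q (List.mem_cons_of_mem _ hq))

theorem pvScan_final (n m : Int) (board d : List (List Int)) (day : Int) (hday : 0 ≤ day)
    (halpha : ∀ p : Int × Int, pvInR n m p →
      pvGet2 board p.1 p.2 = -1 ∨ pvGet2 board p.1 p.2 = 0 ∨ pvGet2 board p.1 p.2 = 1)
    (hone : ∀ p : Int × Int, pvInR n m p → pvGet2 board p.1 p.2 = 1 → pvGet2 d p.1 p.2 ≠ -1)
    (hbd : ∀ p : Int × Int, pvInR n m p → -1 ≤ pvGet2 d p.1 p.2 ∧ pvGet2 d p.1 p.2 ≤ day)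
    (hwit : day = 0 ∨ ∃ p : Int × Int, pvInR n m p ∧ pvGet2 d p.1 p.2 = day) :
    pvScanGo board d (pvAllPos n m) 0 = if pvCnt n m board d = 0 then day else -1 := by
  by_cases hz : pvCnt n m board d = 0
  · rw [if_pos hz]
    unfold pvCnt at hz
    have hnone : ∀ p ∈ pvAllPos n m, ¬(pvGet2 d p.1 p.2 = -1 ∧ pvGet2 board p.1 p.2 ≠ -1) := by
      intro p hpmem hc
      have hpin := (pvMem_allPos n m p).mp hpmem
      rcases halpha p hpin with hb | hb | hb
      · exact hc.2 hb
      · have hfalse := List.countP_eq_zero.mp hz p hpmem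
        rw [hb, hc.1] at hfalse
        simp at hfalse
      · exact (hone p hpin hb) hc.1
    rw [pvScanGo_good board d _ 0 hnone]
    have hub : (pvAllPos n m).foldl (fun a q => max a (pvGet2 d q.1 q.2)) 0 ≤ day :=
      pvFoldlMax_le (pvAllPos n m) (fun p => pvGet2 d p.1 p.2) day 0 hday
        (fun p hpm => (hbd p ((pvMem_allPos n m p).mp hpm)).2)
    rcases hwit with h0 | ⟨p, hpin, hpd⟩
    · have hlb : (0 : Int) ≤ (pvAllPos n m).foldl (fun a q => max a (pvGet2 d q.1 q.2)) 0 :=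
        (PySem.List.le_foldl_max_int (pvAllPos n m) (fun p => pvGet2 d p.1 p.2) 0).1
      omega
    · have hlb : pvGet2 d p.1 p.2 ≤ (pvAllPos n m).foldl (fun a q => max a (pvGet2 d q.1 q.2)) 0 :=
        (PySem.List.le_foldl_max_int (pvAllPos n m) (fun p => pvGet2 d p.1 p.2) 0).2
          p ((pvMem_allPos n m p).mpr hpin)
      rw [hpd] at hlb
      omega
  · rw [if_neg hz]
    unfold pvCnt at hz
    obtain ⟨p, hpm, hpred⟩ := List.countP_pos_iff.mp (Nat.pos_of_ne_zero hz)
    simp only [Bool.and_eq_true, beq_iff_eq] at hpred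
    exact pvScanGo_bad board d _ 0 ⟨p, hpm, hpred.2, by rw [hpred.1]; omega⟩

-- a grid built as a double pyRange map reads back pointwise
theorem pvGridB_get (n m : Int) (f : Int → Int → Bool) (q : Int × Int) (hq : pvInR n m q) :
    pvGetB ((PySem.List.pyRange 0 n 1).map fun x =>
      (PySem.List.pyRange 0 m 1).map fun y => f x y) q.1 q.2 = f q.1 q.2 := by
  obtain ⟨h1, h2, h3, h4⟩ := hq
  unfold pvGetB
  rw [PySem.List.pyRange_one 0 n, PySem.List.pyRange_one 0 m]
  simp only [List.map_map]
  rw [PySem.List.getD_map_range _ _ _ _ (show q.1.toNat < (n - 0).toNat by omega)]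
  simp only [Function.comp_apply, zero_add]
  rw [PySem.List.getD_map_range _ _ _ _ (show q.2.toNat < (m - 0).toNat by omega)]
  simp only [Function.comp_apply]
  rw [Int.toNat_of_nonneg h1, Int.toNat_of_nonneg h3]

theorem pvRipe0_get (n m : Int) (board : List (List Int)) (q : Int × Int) (hq : pvInR n m q) :
    pvGetB (pvRipe0 n m board) q.1 q.2 = (pvGet2 board q.1 q.2 == 1) :=
  pvGridB_get n m _ q hq

theorem pvSweep_get (n m : Int) (board : List (List Int)) (ripe : List (List Bool))
    (q : Int × Int) (hq : pvInR n m q) :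
    pvGetB (pvSweep n m board ripe) q.1 q.2 =
      (pvGetB ripe q.1 q.2 ||
        (pvGet2 board q.1 q.2 == 0 &&
          pvDirs.any fun dp =>
            decide (0 ≤ q.1 + dp.1) && decide (q.1 + dp.1 < n) &&
            decide (0 ≤ q.2 + dp.2) && decide (q.2 + dp.2 < m) &&
            pvGetB ripe (q.1 + dp.1) (q.2 + dp.2))) :=
  pvGridB_get n m _ q hq

-- countP splits over a second predicate
theorem pvCountP_split {α : Type} (l : List α) (f g : α → Bool) :
    l.countP f = l.countP (fun a => f a && g a) + l.countP (fun a => f a && !g a) := by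
  induction l with
  | nil => simp
  | cons a t ih =>
    have key : ∀ x y : Bool, (if x = true then (1 : Nat) else 0)
        = (if (x && y) = true then 1 else 0) + (if (x && !y) = true then 1 else 0) := by decide
    rw [List.countP_cons, List.countP_cons, List.countP_cons, ih, key (f a) (g a)]
    omega

-- a wave on a grid with no unripe zero cells changes nothing
theorem pvId_fold (n m : Int) (board : List (List Int)) (d : List (List Int))
    (hz : pvCnt n m board d = 0) (l : List (Int × Int)) (a : List (Int × Int)) :
    l.foldl (fun s q => pvDirs.foldl (pvStep1 n m board q) s) (d, a) = (d, a) := by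
  have hstep : ∀ (p dp : Int × Int) (a' : List (Int × Int)),
      pvStep1 n m board p (d, a') dp = (d, a') := by
    intro p dp a'
    unfold pvStep1
    rw [if_neg]
    rintro ⟨c1, c2, c3, c4, c5, c6⟩
    have hmem : (p.1 + dp.1, p.2 + dp.2) ∈ pvAllPos n m :=
      (pvMem_allPos n m _).mpr ⟨c1, c2, c3, c4⟩
    have := List.countP_eq_zero.mp hz _ hmem
    simp only [c5, c6] at this
    simp at this
  have hdirs : ∀ (p : Int × Int) (ds : List (Int × Int)) (a' : List (Int × Int)),
      ds.foldl (pvStep1 n m board p) (d, a') = (d, a') := by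
    intro p ds a'
    induction ds with
    | nil => rfl
    | cons e ds ih => rw [List.foldl_cons, hstep p e a', ih]
  induction l with
  | nil => rfl
  | cons p l ih => rw [List.foldl_cons, hdirs p pvDirs a, ih]

theorem pvSimLoop_eq (n m : Int) (board : List (List Int)) (ripe : List (List Bool))
    (remaining : Nat) (day : Int) :
    pvSimLoop n m board ripe remaining day =
      if remaining = 0 then day
      else if pvAddedCnt n m ripe (pvSweep n m board ripe) = 0 then -1
      else pvSimLoop n m board (pvSweep n m board ripe)
        (remaining - pvAddedCnt n m ripe (pvSweep n m board ripe)) (day + 1) := by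
  rw [pvSimLoop]
  by_cases h : remaining = 0 <;> simp [h]

-- the main joint induction: one BFS wave of A corresponds to one sweep day of B
theorem pvMainLoop (n m : Int) (board : List (List Int))
    (halpha : ∀ p : Int × Int, pvInR n m p →
      pvGet2 board p.1 p.2 = -1 ∨ pvGet2 board p.1 p.2 = 0 ∨ pvGet2 board p.1 p.2 = 1) :
    ∀ (fuel : Nat) (wave : List (Int × Int)) (d : List (List Int)) (ripe : List (List Bool))
      (day : Int),
    0 ≤ day →
    (∀ p : Int × Int, pvInR n m p → (pvGetB ripe p.1 p.2 = true ↔ pvGet2 d p.1 p.2 ≠ -1)) →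
    (∀ p : Int × Int, pvInR n m p → pvGet2 board p.1 p.2 = 1 → pvGet2 d p.1 p.2 ≠ -1) →
    (∀ p : Int × Int, pvInR n m p → -1 ≤ pvGet2 d p.1 p.2 ∧ pvGet2 d p.1 p.2 ≤ day) →
    (∀ p : Int × Int, p ∈ wave ↔ (pvInR n m p ∧ pvGet2 d p.1 p.2 = day)) →
    (∀ q : Int × Int, pvInR n m q → pvGet2 board q.1 q.2 = 0 → pvGet2 d q.1 q.2 = -1 →
      ∀ dp ∈ pvDirs, pvInR n m (q.1 + dp.1, q.2 + dp.2) →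
        pvGet2 d (q.1 + dp.1) (q.2 + dp.2) = -1 ∨ pvGet2 d (q.1 + dp.1) (q.2 + dp.2) = day) →
    (day = 0 ∨ ∃ p : Int × Int, pvInR n m p ∧ pvGet2 d p.1 p.2 = day) →
    wave.length + pvCnt n m board d ≤ fuel →
    pvScanGo board (pvBfsLoop n m board fuel wave d) (pvAllPos n m) 0
      = pvSimLoop n m board ripe (pvCnt n m board d) day := by
  intro fuel
  induction fuel using Nat.strong_induction_on with
  | _ fuel ih =>
  intro wave d ripe day hday hrel hone hbd hwave hclo hwit hfuel
  rw [pvSimLoop_eq]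
  by_cases hz : pvCnt n m board d = 0
  · rw [if_pos hz]
    have hbfs : pvBfsLoop n m board fuel wave d = d := by
      conv_lhs => rw [show fuel = (fuel - wave.length) + wave.length from by omega]
      rw [pvBfs_decomp0, pvId_fold n m board d hz wave []]
      simp [pvBfsLoop_nil]
    rw [hbfs, pvScan_final n m board d day hday halpha hone hbd hwit, if_pos hz]
  · rw [if_neg hz]
    set E := wave.foldl (fun s q => pvDirs.foldl (pvStep1 n m board q) s) (d, []) with hE
    have hwaveE : PvWave n m board day d E := by
      rw [hE]
      exact pvWave_wave n m board day hday d wave (fun p hp => (hwave p).mp hp) (d, [])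
        ⟨fun q _ _ => rfl, fun q _ hne => absurd rfl hne, by simp, by simp⟩
    obtain ⟨hkeep, hchg, hnew, hdecE⟩ := hwaveE
    -- the sweep grid is exactly the marked-cells pattern of the grid after the wave
    have hpat : ∀ p : Int × Int, pvInR n m p →
        (pvGetB (pvSweep n m board ripe) p.1 p.2 = true ↔ pvGet2 E.1 p.1 p.2 ≠ -1) := by
      intro p hpin
      rw [pvSweep_get n m board ripe p hpin]
      constructor
      · intro htrue
        simp only [Bool.or_eq_true] at htrue
        rcases htrue with hr | hband
        · have hd := (hrel p hpin).mp hr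
          rw [hkeep p hpin hd]
          exact hd
        · rw [Bool.and_eq_true] at hband
          obtain ⟨hb0b, hany⟩ := hband
          have hb0 : pvGet2 board p.1 p.2 = 0 := by simpa using hb0b
          obtain ⟨dp, hdp, hok⟩ := List.any_eq_true.mp hany
          simp only [Bool.and_eq_true, decide_eq_true_eq] at hok
          obtain ⟨⟨⟨⟨k1, k2⟩, k3⟩, k4⟩, kr⟩ := hok
          have hnbIn : pvInR n m (p.1 + dp.1, p.2 + dp.2) := ⟨k1, k2, k3, k4⟩
          have hnbd : pvGet2 d (p.1 + dp.1) (p.2 + dp.2) ≠ -1 := (hrel _ hnbIn).mp kr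
          by_cases hdm : pvGet2 d p.1 p.2 = -1
          · have hcases := hclo p hpin hb0 hdm dp hdp hnbIn
            have hnbday : pvGet2 d (p.1 + dp.1) (p.2 + dp.2) = day := by
              rcases hcases with h1 | h1
              · exact absurd h1 hnbd
              · exact h1
            have hnbw : (p.1 + dp.1, p.2 + dp.2) ∈ wave :=
              (hwave _).mpr ⟨hnbIn, hnbday⟩
            obtain ⟨dp', hdp', hn1, hn2⟩ := pvDirs_neg dp hdp
            have hmark := pvList_mark n m board wave day hday (p.1 + dp.1, p.2 + dp.2)
              hnbw hnbIn dp' hdp' p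
              ⟨by dsimp only; rw [hn1]; ring, by dsimp only; rw [hn2]; ring⟩
              hpin hb0 (d, []) hnbday
            rw [← hE] at hmark
            exact hmark
          · rw [hkeep p hpin hdm]
            exact hdm
      · intro hne
        by_cases hdm : pvGet2 d p.1 p.2 = -1
        · have hch : pvGet2 E.1 p.1 p.2 ≠ pvGet2 d p.1 p.2 := by rw [hdm]; exact hne
          obtain ⟨hin, hval, hb0, dp, hdp, hnbIn, hnbd⟩ := hnew p (hchg p hpin hch)
          simp only [Bool.or_eq_true]
          right
          rw [Bool.and_eq_true]
          refine ⟨by simp [hb0], ?_⟩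
          apply List.any_eq_true.mpr
          refine ⟨dp, hdp, ?_⟩
          obtain ⟨g1, g2, g3, g4⟩ := hnbIn
          have hripenb : pvGetB ripe (p.1 + dp.1) (p.2 + dp.2) = true :=
            (hrel _ ⟨g1, g2, g3, g4⟩).mpr (by rw [hnbd]; omega)
          simp [g1, g2, g3, g4, hripenb]
        · simp only [Bool.or_eq_true]
          exact Or.inl ((hrel p hpin).mpr hdm)
    -- d = -1 & E ≠ -1 forces a zero cell (it was marked this wave)
    have hzero : ∀ p : Int × Int, pvInR n m p → pvGet2 d p.1 p.2 = -1 →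
        pvGet2 E.1 p.1 p.2 ≠ -1 → pvGet2 board p.1 p.2 = 0 := by
      intro p hpin hdm hne
      have hch : pvGet2 E.1 p.1 p.2 ≠ pvGet2 d p.1 p.2 := by rw [hdm]; exact hne
      exact (hnew p (hchg p hpin hch)).2.2.1
    -- the sweep's added count closes the count equation
    have hadd : pvCnt n m board d
        = pvCnt n m board E.1 + pvAddedCnt n m ripe (pvSweep n m board ripe) := by
      unfold pvCnt pvAddedCnt
      rw [pvCountP_split (pvAllPos n m)
        (fun p => pvGet2 board p.1 p.2 == 0 && pvGet2 d p.1 p.2 == -1)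
        (fun p => pvGet2 E.1 p.1 p.2 == -1)]
      congr 1
      · apply List.countP_congr
        intro p hpm
        have hpin := (pvMem_allPos n m p).mp hpm
        have himp : pvGet2 E.1 p.1 p.2 = -1 → pvGet2 d p.1 p.2 = -1 := by
          intro hE1
          by_contra hd1
          rw [hkeep p hpin hd1] at hE1
          exact hd1 hE1
        by_cases h0 : pvGet2 board p.1 p.2 = 0 <;>
          by_cases hE1 : pvGet2 E.1 p.1 p.2 = -1 <;>
            simp [h0, hE1, himp]
      · apply List.countP_congr
        intro p hpm
        have hpin := (pvMem_allPos n m p).mp hpm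
        cases hnewb : pvGetB (pvSweep n m board ripe) p.1 p.2 <;>
          cases hripeb : pvGetB ripe p.1 p.2
        · -- new false, ripe false: E = -1, LHS forced false by E==-1
          have hE1 : pvGet2 E.1 p.1 p.2 = -1 := by
            by_contra hc
            have := (hpat p hpin).mpr hc
            rw [this] at hnewb
            simp at hnewb
          simp [hE1]
        · -- new false, ripe true: d ≠ -1, LHS false via d==-1
          have hd1 : pvGet2 d p.1 p.2 ≠ -1 := (hrel p hpin).mp hripeb
          simp [hd1]
        · -- new true, ripe false: E ≠ -1, d = -1, zero: LHS true
          have hE1 : pvGet2 E.1 p.1 p.2 ≠ -1 := (hpat p hpin).mp hnewb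
          have hd1 : pvGet2 d p.1 p.2 = -1 := by
            by_contra hc
            have := (hrel p hpin).mpr hc
            rw [this] at hripeb
            simp at hripeb
          have h0 := hzero p hpin hd1 hE1
          simp [hE1, hd1, h0]
        · -- new true, ripe true: d ≠ -1, hence E = d ≠ -1: LHS false, RHS false
          have hd1 : pvGet2 d p.1 p.2 ≠ -1 := (hrel p hpin).mp hripeb
          simp [hd1]
    by_cases ha : pvAddedCnt n m ripe (pvSweep n m board ripe) = 0
    · rw [if_pos ha]
      have hE2 : E.2 = [] := List.length_eq_zero_iff.mp (by omega)
      have hbfs : pvBfsLoop n m board fuel wave d = E.1 := by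
        conv_lhs => rw [show fuel = (fuel - wave.length) + wave.length from by omega]
        rw [pvBfs_decomp0, ← hE, hE2, pvBfsLoop_nil]
      rw [hbfs]
      have hzE : pvCnt n m board E.1 ≠ 0 := by omega
      unfold pvCnt at hzE
      obtain ⟨p, hpm, hpred⟩ := List.countP_pos_iff.mp (Nat.pos_of_ne_zero hzE)
      simp only [Bool.and_eq_true, beq_iff_eq] at hpred
      exact pvScanGo_bad board E.1 _ 0 ⟨p, hpm, hpred.2, by rw [hpred.1]; omega⟩
    · rw [if_neg ha]
      have hwne : wave ≠ [] := by
        intro hnil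
        apply ha
        have hEd : E = (d, []) := by rw [hE, hnil]; rfl
        rw [hEd] at hadd
        dsimp only at hadd
        omega
      have hlw : 1 ≤ wave.length := List.length_pos_of_ne_nil hwne
      have hbfs : pvBfsLoop n m board fuel wave d
          = pvBfsLoop n m board (fuel - wave.length) E.2 E.1 := by
        conv_lhs => rw [show fuel = (fuel - wave.length) + wave.length from by omega]
        rw [pvBfs_decomp0, ← hE]
      rw [hbfs,
        show pvCnt n m board d - pvAddedCnt n m ripe (pvSweep n m board ripe)
          = pvCnt n m board E.1 from by omega]
      apply ih (fuel - wave.length) (by omega) E.2 E.1 (pvSweep n m board ripe) (day + 1)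
        (by omega) hpat
      · intro p hpin hb1
        have hd := hone p hpin hb1
        rw [hkeep p hpin hd]
        exact hd
      · intro p hpin
        by_cases he : pvGet2 E.1 p.1 p.2 = pvGet2 d p.1 p.2
        · rw [he]
          have := hbd p hpin
          omega
        · have hval := (hnew p (hchg p hpin he)).2.1
          omega
      · intro p
        constructor
        · intro hpm
          obtain ⟨hin, hval, _, _⟩ := hnew p hpm
          exact ⟨hin, hval⟩
        · rintro ⟨hin, hval⟩
          apply hchg p hin
          have := hbd p hin
          omega
      · intro q hqin hq0 hqE dp hdp hnbIn
        have hdq : pvGet2 d q.1 q.2 = -1 := by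
          by_contra hc
          rw [hkeep q hqin hc] at hqE
          exact hc hqE
        by_cases hnb1 : pvGet2 E.1 (q.1 + dp.1) (q.2 + dp.2) = -1
        · exact Or.inl hnb1
        · by_cases hnb2 : pvGet2 E.1 (q.1 + dp.1) (q.2 + dp.2)
              = pvGet2 d (q.1 + dp.1) (q.2 + dp.2)
          · exfalso
            have hnbd : pvGet2 d (q.1 + dp.1) (q.2 + dp.2) ≠ -1 := by
              rw [← hnb2]; exact hnb1
            have hnbday : pvGet2 d (q.1 + dp.1) (q.2 + dp.2) = day := by
              rcases hclo q hqin hq0 hdq dp hdp hnbIn with h1 | h1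
              · exact absurd h1 hnbd
              · exact h1
            have hnbw : (q.1 + dp.1, q.2 + dp.2) ∈ wave := (hwave _).mpr ⟨hnbIn, hnbday⟩
            obtain ⟨dp', hdp', hn1, hn2⟩ := pvDirs_neg dp hdp
            have hmark := pvList_mark n m board wave day hday (q.1 + dp.1, q.2 + dp.2)
              hnbw hnbIn dp' hdp' q
              ⟨by dsimp only; rw [hn1]; ring, by dsimp only; rw [hn2]; ring⟩
              hqin hq0 (d, []) hnbday
            rw [← hE] at hmark
            exact hmark hqE
          · exact Or.inr (hnew _ (hchg _ hnbIn hnb2)).2.1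
      · right
        have ha' := ha
        unfold pvAddedCnt at ha'
        obtain ⟨p, hpm, hpred⟩ := List.countP_pos_iff.mp (Nat.pos_of_ne_zero ha')
        have hpin := (pvMem_allPos n m p).mp hpm
        rw [Bool.and_eq_true] at hpred
        obtain ⟨hnewb, hripeb⟩ := hpred
        have hE1 : pvGet2 E.1 p.1 p.2 ≠ -1 := (hpat p hpin).mp hnewb
        have hd1 : pvGet2 d p.1 p.2 = -1 := by
          by_contra hc
          have := (hrel p hpin).mpr hc
          rw [this] at hripeb
          simp at hripeb
        have hch : pvGet2 E.1 p.1 p.2 ≠ pvGet2 d p.1 p.2 := by rw [hd1]; exact hE1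
        exact ⟨p, hpin, (hnew p (hchg p hpin hch)).2.1⟩
      · omega

theorem pvSet2_len (g : List (List Int)) (x y : Int) (v : Int) :
    (pvSet2 g x y v).length = g.length := by
  unfold pvSet2
  exact List.length_modify _ _ _

theorem pvSet2_rowlen (g : List (List Int)) (x y : Int) (v : Int) (i : Nat) :
    ((pvSet2 g x y v).getD i []).length = (g.getD i []).length := by
  unfold pvSet2
  rw [List.getD_eq_getElem?_getD, List.getD_eq_getElem?_getD, List.getElem?_modify]
  cases h : g[i]? with
  | none => rfl
  | some r =>
    by_cases hx : x.toNat = i <;> simp [hx]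

theorem pvFoldlSet0_get (l : List (Int × Int)) :
    ∀ (g : List (List Int)) (x y : Int), 0 ≤ x → 0 ≤ y →
    (∀ p ∈ l, 0 ≤ p.1 ∧ 0 ≤ p.2 ∧ p.1.toNat < g.length ∧ p.2.toNat < (g.getD p.1.toNat []).length) →
    pvGet2 (l.foldl (fun dd p => pvSet2 dd p.1 p.2 0) g) x y
      = if (x, y) ∈ l then 0 else pvGet2 g x y := by
  induction l with
  | nil => intro g x y _ _ _; simp
  | cons a t ih =>
    intro g x y hx hy hl
    rw [List.foldl_cons]
    have ha := hl a List.mem_cons_self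
    have hl' : ∀ p ∈ t, 0 ≤ p.1 ∧ 0 ≤ p.2 ∧ p.1.toNat < (pvSet2 g a.1 a.2 0).length ∧
        p.2.toNat < ((pvSet2 g a.1 a.2 0).getD p.1.toNat []).length := by
      intro p hp
      have := hl p (List.mem_cons_of_mem _ hp)
      rw [pvSet2_len, pvSet2_rowlen]
      exact this
    rw [ih (pvSet2 g a.1 a.2 0) x y hx hy hl']
    by_cases hm : (x, y) ∈ t
    · rw [if_pos hm, if_pos (List.mem_cons_of_mem _ hm)]
    · rw [if_neg hm,
        pvGet2_set2 g 0 a.1 a.2 x y ha.1 ha.2.1 hx hy ha.2.2.1 ha.2.2.2]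
      by_cases he : x = a.1 ∧ y = a.2
      · rw [if_pos he, if_pos (by
          have : (x, y) = a := Prod.ext he.1 he.2
          rw [this]
          exact List.mem_cons_self)]
      · rw [if_neg he, if_neg (by
          intro hc
          rcases List.mem_cons.mp hc with h1 | h1
          · exact he ⟨congrArg Prod.fst h1, congrArg Prod.snd h1⟩
          · exact hm h1)]

theorem pvDist0_get (n m : Int) (board : List (List Int)) (q : Int × Int) (hq : pvInR n m q) :
    pvGet2 (pvDist0 n m board) q.1 q.2 = if pvGet2 board q.1 q.2 = 1 then 0 else -1 := by
  obtain ⟨h1, h2, h3, h4⟩ := hq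
  have e1 : (List.replicate n.toNat (List.replicate m.toNat (-1 : Int))).getD q.1.toNat []
      = List.replicate m.toNat (-1) := by
    rw [List.getD_eq_getElem _ _ (show q.1.toNat <
      (List.replicate n.toNat (List.replicate m.toNat (-1 : Int))).length by
        rw [List.length_replicate]; omega)]
    exact List.getElem_replicate _
  have hbase : pvGet2 (List.replicate n.toNat (List.replicate m.toNat (-1))) q.1 q.2 = -1 := by
    unfold pvGet2
    rw [e1, List.getD_eq_getElem _ _ (show q.2.toNat <
      (List.replicate m.toNat (-1 : Int)).length by rw [List.length_replicate]; omega)]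
    exact List.getElem_replicate _
  have hbounds : ∀ p ∈ pvStarts n m board, 0 ≤ p.1 ∧ 0 ≤ p.2 ∧
      p.1.toNat < (List.replicate n.toNat (List.replicate m.toNat (-1))).length ∧
      p.2.toNat < ((List.replicate n.toNat (List.replicate m.toNat (-1))).getD p.1.toNat []).length := by
    intro p hp
    obtain ⟨⟨g1, g2, g3, g4⟩, _⟩ := (pvMem_starts n m board p).mp hp
    refine ⟨g1, g3, by rw [List.length_replicate]; omega, ?_⟩
    have e2 : (List.replicate n.toNat (List.replicate m.toNat (-1 : Int))).getD p.1.toNat []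
        = List.replicate m.toNat (-1) := by
      rw [List.getD_eq_getElem _ _ (show p.1.toNat <
        (List.replicate n.toNat (List.replicate m.toNat (-1 : Int))).length by
          rw [List.length_replicate]; omega)]
      exact List.getElem_replicate _
    rw [e2, List.length_replicate]
    omega
  unfold pvDist0
  rw [pvFoldlSet0_get (pvStarts n m board) _ q.1 q.2 h1 h3 hbounds, hbase]
  by_cases hb : pvGet2 board q.1 q.2 = 1
  · rw [if_pos ((pvMem_starts n m board (q.1, q.2)).mpr ⟨⟨h1, h2, h3, h4⟩, hb⟩), if_pos hb]
  · rw [if_neg (fun hc => hb ((pvMem_starts n m board (q.1, q.2)).mp hc).2), if_neg hb]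

-- ===== VERDICT (by name: the statement is the Claim_ definition above) =====
theorem solve_spec : Claim_equal_solve := by
  intro n m board _ hpre
  unfold Spec_solve solve solve_alt
  have halpha : ∀ p : Int × Int, pvInR n m p →
      pvGet2 board p.1 p.2 = -1 ∨ pvGet2 board p.1 p.2 = 0 ∨ pvGet2 board p.1 p.2 = 1 := by
    intro p hp
    obtain ⟨h1, h2, h3, h4⟩ := hp
    obtain ⟨hlen, hrows⟩ := hpre (lt_of_le_of_lt h1 h2) (lt_of_le_of_lt h3 h4)
    have hx : p.1.toNat < board.length := by omega
    have hrowm : board[p.1.toNat] ∈ board.take n.toNat := by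
      have hlt : p.1.toNat < (board.take n.toNat).length := by simp; omega
      have hgt : (board.take n.toNat)[p.1.toNat] = board[p.1.toNat] := List.getElem_take
      rw [← hgt]
      exact List.getElem_mem hlt
    obtain ⟨hrlen, hvals⟩ := hrows _ hrowm
    have hy : p.2.toNat < board[p.1.toNat].length := by omega
    have hvm : board[p.1.toNat][p.2.toNat] ∈ board[p.1.toNat].take m.toNat := by
      have hlt : p.2.toNat < (board[p.1.toNat].take m.toNat).length := by simp; omega
      have hgt : (board[p.1.toNat].take m.toNat)[p.2.toNat] = board[p.1.toNat][p.2.toNat] :=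
        List.getElem_take
      rw [← hgt]
      exact List.getElem_mem hlt
    have hget : pvGet2 board p.1 p.2 = board[p.1.toNat][p.2.toNat] := by
      unfold pvGet2
      rw [List.getD_eq_getElem _ _ hx, List.getD_eq_getElem _ _ hy]
    rw [hget]
    exact hvals _ hvm
  have hcnt0 : ((pvAllPos n m).countP fun p => pvGet2 board p.1 p.2 == 0)
      = pvCnt n m board (pvDist0 n m board) := by
    unfold pvCnt
    apply List.countP_congr
    intro q hqm
    have hq := (pvMem_allPos n m q).mp hqm
    have hd := pvDist0_get n m board q hq
    by_cases hb : pvGet2 board q.1 q.2 = 0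
    · rw [if_neg (by rw [hb]; norm_num)] at hd
      simp [hb, hd]
    · simp [hb]
  have hfuel0 : (pvStarts n m board).length + pvCnt n m board (pvDist0 n m board)
      ≤ 2 * n.toNat * m.toNat + 1 := by
    have h1 := pvLen_starts_le n m board
    have h2 : pvCnt n m board (pvDist0 n m board) ≤ (pvAllPos n m).length :=
      List.countP_le_length
    rw [pvLen_allPos] at h2
    have h3 : 2 * n.toNat * m.toNat = n.toNat * m.toNat + n.toNat * m.toNat := by ring
    omega
  rw [hcnt0]
  apply pvMainLoop n m board halpha (2 * n.toNat * m.toNat + 1)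
    (pvStarts n m board) (pvDist0 n m board) (pvRipe0 n m board) 0
    le_rfl
  · intro q hq
    rw [pvRipe0_get n m board q hq, pvDist0_get n m board q hq]
    by_cases hb : pvGet2 board q.1 q.2 = 1 <;> simp [hb]
  · intro q hq hb
    rw [pvDist0_get n m board q hq, if_pos hb]
    omega
  · intro q hq
    rw [pvDist0_get n m board q hq]
    split_ifs <;> omega
  · intro p
    rw [pvMem_starts n m board p]
    constructor
    · rintro ⟨hin, hb⟩
      exact ⟨hin, by rw [pvDist0_get n m board p hin, if_pos hb]⟩
    · rintro ⟨hin, hd⟩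
      refine ⟨hin, ?_⟩
      rw [pvDist0_get n m board p hin] at hd
      by_cases hb : pvGet2 board p.1 p.2 = 1
      · exact hb
      · rw [if_neg hb] at hd; omega
  · intro q hq _ _ dp _ hnb
    rw [pvDist0_get n m board (q.1 + dp.1, q.2 + dp.2) hnb]
    split_ifs with h
    · right; rfl
    · left; rfl
  · exact Or.inl rfl
  · exact hfuel0
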